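-- pv_equiv track=rewrite | github.com/alextung2/ece271b-age-occlusion | src/data/utkface.py | age_to_bin
-- ===== SOURCE A (Python) =====
-- from typing import List, Union
--
-- def age_to_bin(age: int, bins: List[int]) -> int:
--     """
--     bins example: [0,10,20,30,40,50,60,200] -> 7 classes
--     returns class index in [0, K-1]
--     interval is [bins[k], bins[k+1])
--     """
--     assert isinstance(age, int) and age >= 0, "age must be a nonnegative int"
--     assert len(bins) >= 2, "bins must have at least 2 edges"
--     assert all(bins[i] < bins[i + 1] for i in range(len(bins) - 1)), "bins must be strictly increasing"
--
--     for k in range(len(bins) - 1):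
--         if bins[k] <= age < bins[k + 1]:
--             return k
--
--     # IMPORTANT: do NOT silently map to last class; it hides bugs.
--     raise ValueError(f"Age {age} is outside bin edges {bins}")
-- ===== SOURCE B (Python) =====
-- from typing import List, Union
--
-- def age_to_bin(age: int, bins: List[int]) -> int:
--     assert isinstance(age, int) and age >= 0, "age must be a nonnegative int"
--     assert len(bins) >= 2, "bins must have at least 2 edges"
--     assert all(bins[i] < bins[i + 1] for i in range(len(bins) - 1)), "bins must be strictly increasing"
--
--     # binary search (bisect_right by hand: A imports no stdlib modules we could use)
--     lo, hi = 0, len(bins)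
--     while lo < hi:
--         mid = (lo + hi) // 2
--         if bins[mid] <= age:
--             lo = mid + 1
--         else:
--             hi = mid
--     idx = lo - 1
--     if 0 <= idx < len(bins) - 1:
--         return idx
--     raise ValueError(f"Age {age} is outside bin edges {bins}")
-- ===== Notes on version B (the rewrite author's own statement) =====
-- stated objective: faster
-- what changed: Replaces the linear scan over adjacent bin pairs with a hand-written bisect_right binary search over the edges (idx = insertion point - 1), keeping the same asserts and the same ValueError for out-of-range ages.
import Mathlib
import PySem

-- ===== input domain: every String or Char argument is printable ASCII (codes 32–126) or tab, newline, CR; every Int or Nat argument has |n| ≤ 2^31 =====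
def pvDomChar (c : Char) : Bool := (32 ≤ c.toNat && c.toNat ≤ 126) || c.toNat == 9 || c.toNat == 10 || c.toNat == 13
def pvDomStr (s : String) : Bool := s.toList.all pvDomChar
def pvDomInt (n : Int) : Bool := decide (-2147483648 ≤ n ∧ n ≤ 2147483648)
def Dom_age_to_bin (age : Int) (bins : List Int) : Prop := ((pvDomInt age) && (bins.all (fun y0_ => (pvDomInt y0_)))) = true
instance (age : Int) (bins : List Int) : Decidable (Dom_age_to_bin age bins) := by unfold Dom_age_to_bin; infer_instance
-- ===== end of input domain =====

-- B replaces A's linear scan over adjacent bin pairs with a bisect_right-style binary search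
-- over the same edges (alternative algorithm; asserts and out-of-range ValueError unchanged).


-- ===== PORT A =====
-- the `for k in range(len(bins)-1)` scan; falling through the loop = ValueError (excluded by Pre_)
def aScan (age : Int) (bins : List Int) (k : Nat) : Int :=
  if _h : k + 1 < bins.length then
    if bins.getD k 0 ≤ age ∧ age < bins.getD (k + 1) 0 then (k : Int)
    else aScan age bins (k + 1)
  else 0
termination_by bins.length - k

-- asserts failing and the final `raise ValueError` are excluded by Pre_age_to_bin
def age_to_bin (age : Int) (bins : List Int) : Int := aScan age bins 0

-- ===== PORT B =====
-- the `while lo < hi` bisect_right loop of Source B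
def bsearch (age : Int) (bins : List Int) (lo hi : Nat) : Nat :=
  if _h : lo < hi then
    let mid := (lo + hi) / 2
    if bins.getD mid 0 ≤ age then bsearch age bins (mid + 1) hi
    else bsearch age bins lo mid
  else lo
termination_by hi - lo

-- asserts failing and the `raise ValueError` branch are excluded by Pre_age_to_bin
def age_to_bin_alt (age : Int) (bins : List Int) : Int :=
  let lo := bsearch age bins 0 bins.length
  let idx : Int := (lo : Int) - 1
  if 0 ≤ idx ∧ idx < (bins.length : Int) - 1 then idx else 0

-- ===== PRECONDITION & SPEC =====
-- exactly the inputs where Python A returns: asserts pass (age ≥ 0, ≥ 2 strictly increasing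
-- edges) and age falls in some interval, i.e. bins[0] ≤ age < bins[-1]; elsewhere A raises.
def Pre_age_to_bin (age : Int) (bins : List Int) : Prop :=
  0 ≤ age ∧ 2 ≤ bins.length ∧ List.Pairwise (· < ·) bins ∧
  bins.getD 0 0 ≤ age ∧ age < bins.getD (bins.length - 1) 0
instance (age : Int) (bins : List Int) : Decidable (Pre_age_to_bin age bins) := by
  unfold Pre_age_to_bin; infer_instance

def pvWitness_age_to_bin : Int × List Int := (25, [0, 10, 20, 30, 200])

def Spec_age_to_bin (age : Int) (bins : List Int) (out : Int) : Prop := out = age_to_bin_alt age bins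
instance (age : Int) (bins : List Int) (out : Int) : Decidable (Spec_age_to_bin age bins out) := by unfold Spec_age_to_bin; infer_instance

-- ===== CLAIM (what is proved, stated in full; the proofs are below) =====
def Claim_equal_age_to_bin : Prop := ∀ (age : Int) (bins : List Int), Dom_age_to_bin age bins → Pre_age_to_bin age bins → Spec_age_to_bin age bins (age_to_bin age bins)

-- ===== LEMMAS AND PROOFS =====

-- strict monotonicity in getD form
theorem sorted_getD_lt {bins : List Int} (hs : List.Pairwise (· < ·) bins)
    {i j : Nat} (hij : i < j) (hj : j < bins.length) :
    bins.getD i 0 < bins.getD j 0 := by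
  have hi : i < bins.length := Nat.lt_trans hij hj
  rw [bins.getD_eq_getElem 0 hi, bins.getD_eq_getElem 0 hj]
  exact List.pairwise_iff_getElem.mp hs i j hi hj hij

-- the found-interval property is unique under strict sortedness
theorem interval_uniq {age : Int} {bins : List Int} (hs : List.Pairwise (· < ·) bins)
    {k m : Nat} (hk : k + 1 < bins.length) (hm : m + 1 < bins.length)
    (hk1 : bins.getD k 0 ≤ age) (hk2 : age < bins.getD (k + 1) 0)
    (hm1 : bins.getD m 0 ≤ age) (hm2 : age < bins.getD (m + 1) 0) : k = m := by
  rcases Nat.lt_trichotomy k m with h | h | h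
  · have : bins.getD (k + 1) 0 ≤ bins.getD m 0 := by
      rcases Nat.lt_or_ge (k + 1) m with h' | h'
      · exact le_of_lt (sorted_getD_lt hs h' (Nat.lt_of_succ_lt hm))
      · have : k + 1 = m := Nat.le_antisymm h h'
        simp [this]
    omega
  · exact h
  · have : bins.getD (m + 1) 0 ≤ bins.getD k 0 := by
      rcases Nat.lt_or_ge (m + 1) k with h' | h'
      · exact le_of_lt (sorted_getD_lt hs h' (Nat.lt_of_succ_lt hk))
      · have : m + 1 = k := Nat.le_antisymm h h'
        simp [this]
    omega

-- binary-search invariant: bsearch returns the partition point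
theorem bsearch_spec (age : Int) (bins : List Int)
    (hs : List.Pairwise (· < ·) bins) :
    ∀ n lo hi, hi - lo ≤ n → lo ≤ hi → hi ≤ bins.length →
    (∀ i, i < lo → bins.getD i 0 ≤ age) →
    (∀ i, hi ≤ i → i < bins.length → age < bins.getD i 0) →
    lo ≤ bsearch age bins lo hi ∧ bsearch age bins lo hi ≤ hi ∧
    (∀ i, i < bsearch age bins lo hi → bins.getD i 0 ≤ age) ∧
    (∀ i, bsearch age bins lo hi ≤ i → i < bins.length → age < bins.getD i 0) := by
  intro n
  induction n with
  | zero =>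
    intro lo hi hn hlh _ hlow hhigh
    have : lo = hi := by omega
    subst this
    rw [bsearch]
    simp only [lt_irrefl, dif_neg, not_false_iff]
    exact ⟨le_refl _, le_refl _, hlow, hhigh⟩
  | succ n ih =>
    intro lo hi hn hlh hhl hlow hhigh
    rw [bsearch]
    by_cases h : lo < hi
    · simp only [h, dif_pos]
      set mid := (lo + hi) / 2 with hmid
      have hm1 : lo ≤ mid := by omega
      have hm2 : mid < hi := by omega
      by_cases hc : bins.getD mid 0 ≤ age
      · simp only [hc, if_pos]
        have := ih (mid + 1) hi (by omega) (by omega) hhl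
          (fun i hi' => by
            rcases Nat.lt_or_ge i lo with h' | h'
            · exact hlow i h'
            · rcases Nat.lt_or_ge i mid with h'' | h''
              · exact le_trans (le_of_lt (sorted_getD_lt
                  hs h'' (by omega))) hc
              · have : i = mid := by omega
                rw [this]; exact hc)
          hhigh
        exact ⟨by omega, this.2.1, this.2.2.1, this.2.2.2⟩
      · simp only [hc, if_neg, not_false_iff]
        rw [not_le] at hc
        have := ih lo mid (by omega) (by omega) (by omega) hlow
          (fun i hi1 hi2 => by
            rcases Nat.lt_or_ge mid i with h'' | h''
            · exact lt_trans hc (sorted_getD_lt hs h'' hi2)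
            · have : i = mid := by omega
              rw [this]; exact hc)
        exact ⟨this.1, by omega, this.2.2.1, this.2.2.2⟩
    · simp only [h, dif_neg, not_false_iff]
      have : lo = hi := by omega
      subst this
      exact ⟨le_refl _, le_refl _, hlow, hhigh⟩

-- A's scan finds the (unique) interval index when one exists at or after k
theorem aScan_found (age : Int) (bins : List Int) (hs : List.Pairwise (· < ·) bins) :
    ∀ n k m, bins.length - k ≤ n → k ≤ m → m + 1 < bins.length →
    bins.getD m 0 ≤ age → age < bins.getD (m + 1) 0 → aScan age bins k = (m : Int) := by
  intro n
  induction n with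
  | zero => intro k m hn hkm hm _ _; omega
  | succ n ih =>
    intro k m hn hkm hm h1 h2
    have hk : k + 1 < bins.length := by omega
    rw [aScan]
    simp only [hk, dif_pos]
    by_cases hc : bins.getD k 0 ≤ age ∧ age < bins.getD (k + 1) 0
    · simp only [hc]
      exact congrArg _ (interval_uniq hs hk hm hc.1 hc.2 h1 h2)
    · simp only [hc, if_neg, not_false_iff]
      have hne : k ≠ m := by
        intro h; subst h; exact hc ⟨h1, h2⟩
      exact ih (k + 1) m (by omega) (by omega) hm h1 h2

-- ===== VERDICT (by name: the statement is the Claim_ definition above) =====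
theorem age_to_bin_spec : Claim_equal_age_to_bin := by
  intro age bins _ hpre
  obtain ⟨_, hlen, hs, hlo, hhi⟩ := hpre
  simp only [Spec_age_to_bin, age_to_bin, age_to_bin_alt]
  have hb := bsearch_spec age bins hs bins.length 0 bins.length (by omega) (by omega)
    (le_refl _) (by omega) (fun i h1 h2 => by omega)
  set p := bsearch age bins 0 bins.length with hp
  obtain ⟨-, hple, hlow, hhigh⟩ := hb
  -- 1 ≤ p: otherwise age < bins[0]
  have h1p : 1 ≤ p := by
    by_contra h
    have := hhigh 0 (by omega) (by omega)
    omega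
  -- p ≤ len - 1: otherwise bins[len-1] ≤ age
  have h2p : p ≤ bins.length - 1 := by
    by_contra h
    have := hlow (bins.length - 1) (by omega)
    omega
  -- the interval at p - 1 contains age
  have hm : (p - 1) + 1 < bins.length := by omega
  have hm1 : bins.getD (p - 1) 0 ≤ age := hlow (p - 1) (by omega)
  have hm2 : age < bins.getD ((p - 1) + 1) 0 := hhigh ((p - 1) + 1) (by omega) (by omega)
  have hA : aScan age bins 0 = ((p - 1 : Nat) : Int) :=
    aScan_found age bins hs bins.length 0 (p - 1) (by omega) (by omega) hm hm1 hm2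
  have hcond : 0 ≤ (p : Int) - 1 ∧ (p : Int) - 1 < (bins.length : Int) - 1 := by
    constructor <;> omega
  rw [hA, if_pos hcond]
  omega
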